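-- pv_equiv track=rewrite | github.com/JAIS0N/DailyLeetChallenge | 1665-minimum-initial-energy-to-finish-tasks/1665-minimum-initial-energy-to-finish-tasks.py | minimumEffort
-- ===== SOURCE A (Python) =====
-- from typing import List
--
-- def minimumEffort(tasks: List[List[int]]) -> int:
--     tasks.sort(key=lambda x: x[1] - x[0], reverse=True)
--
--     initial_energy = 0
--     current_energy = 0
--
--     for actual, minimum in tasks:
--         if current_energy < minimum:
--             needed = minimum - current_energy
--             initial_energy += needed
--             current_energy += needed
--
--         current_energy -= actual
--
--     return initial_energy
-- ===== SOURCE B (Python) =====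
-- from typing import List
--
-- def minimumEffort(tasks: List[List[int]]) -> int:
--     tasks.sort(key=lambda x: x[1] - x[0], reverse=True)
--
--     def feasible(energy):
--         e = energy
--         for actual, minimum in tasks:
--             if e < minimum:
--                 return False
--             e -= actual
--         return True
--
--     lo = 0
--     hi = sum(max(a, m, 0) for a, m in tasks)
--     while lo < hi:
--         mid = (lo + hi) // 2
--         if feasible(mid):
--             hi = mid
--         else:
--             lo = mid + 1
--     return lo
-- ===== Notes on version B (the rewrite author's own statement) =====
-- stated objective: alternative
-- what changed: B replaces A's one-pass greedy energy-patching with binary search on the answer: after the same sort it searches the least initial energy in [0, sum(max(a,m,0))] for which a pure feasibility simulation (never top up, fail if energy drops below a task's minimum) succeeds.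
import Mathlib
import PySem

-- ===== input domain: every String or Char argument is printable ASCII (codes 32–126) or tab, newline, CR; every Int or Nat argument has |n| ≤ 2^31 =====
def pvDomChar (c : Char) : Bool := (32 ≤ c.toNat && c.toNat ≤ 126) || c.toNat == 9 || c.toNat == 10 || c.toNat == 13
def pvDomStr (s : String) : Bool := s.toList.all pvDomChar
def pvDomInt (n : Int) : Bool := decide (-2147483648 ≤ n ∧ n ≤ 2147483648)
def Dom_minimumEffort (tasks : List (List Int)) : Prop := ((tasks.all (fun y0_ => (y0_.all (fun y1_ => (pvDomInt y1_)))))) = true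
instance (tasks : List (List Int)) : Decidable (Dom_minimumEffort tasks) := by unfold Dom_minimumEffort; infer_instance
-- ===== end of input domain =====

-- B replaces A's one-pass greedy energy-patching by a binary search on the answer with
-- a pure feasibility simulation (objective: alternative). Python A sorts `tasks` in
-- place; the equivalence proved here is about the RETURN value only (B sorts the same way).

-- ===== PORT A =====
-- key/element access: Pre_ guarantees every inner list has length 2, so pyGet?.getD 0 is exact there
def pvKey (x : List Int) : Int := ((PySem.List.pyGet? x 1).getD 0) - ((PySem.List.pyGet? x 0).getD 0)

def pvStepA (st : Int × Int) (t : List Int) : Int × Int :=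
  let actual := (PySem.List.pyGet? t 0).getD 0
  let minimum := (PySem.List.pyGet? t 1).getD 0
  let st2 := if st.2 < minimum then (st.1 + (minimum - st.2), st.2 + (minimum - st.2)) else st
  (st2.1, st2.2 - actual)

def minimumEffort (tasks : List (List Int)) : Int :=
  let ts := PySem.List.sorted tasks pvKey true
  (ts.foldl pvStepA (0, 0)).1

-- ===== PORT B =====
-- `def feasible(energy)`: simulate without topping up; fail as soon as energy < minimum
def pvFeasible (ts : List (List Int)) (e : Int) : Bool :=
  match ts with
  | [] => true
  | t :: rest =>
    let actual := (PySem.List.pyGet? t 0).getD 0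
    let minimum := (PySem.List.pyGet? t 1).getD 0
    if e < minimum then false else pvFeasible rest (e - actual)

-- `hi = sum(max(a, m, 0) for a, m in tasks)`
def pvMx (t : List Int) : Int :=
  max (max ((PySem.List.pyGet? t 0).getD 0) ((PySem.List.pyGet? t 1).getD 0)) 0

def pvHi (ts : List (List Int)) : Int := ts.foldl (fun s t => s + pvMx t) 0

-- midpoint bounds, used for termination of the while-loop recursion
theorem pvMid_bounds (lo hi : Int) (h : lo < hi) :
    lo ≤ PySem.Int.floordiv (lo + hi) 2 ∧ PySem.Int.floordiv (lo + hi) 2 < hi := by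
  rw [PySem.Int.floordiv_eq_ediv_of_pos (by omega : (0:Int) < 2)]
  omega

-- the `while lo < hi` loop
def pvBS (ts : List (List Int)) (lo hi : Int) : Int :=
  if h : lo < hi then
    let mid := PySem.Int.floordiv (lo + hi) 2
    if pvFeasible ts mid then pvBS ts lo mid else pvBS ts (mid + 1) hi
  else lo
termination_by (hi - lo).toNat
decreasing_by
  · have := pvMid_bounds lo hi h; omega
  · have := pvMid_bounds lo hi h; omega

def minimumEffort_alt (tasks : List (List Int)) : Int :=
  let ts := PySem.List.sorted tasks pvKey true
  pvBS ts 0 (pvHi ts)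

-- ===== PRECONDITION & SPEC =====
-- Pre_ excludes exactly the inputs where Python A raises: an inner list of length ≠ 2
-- makes the sort key or the loop unpacking raise (IndexError/ValueError).
def Pre_minimumEffort (tasks : List (List Int)) : Prop := ∀ t ∈ tasks, t.length = 2
instance (tasks : List (List Int)) : Decidable (Pre_minimumEffort tasks) := by unfold Pre_minimumEffort; infer_instance
def pvWitness_minimumEffort : List (List Int) := [[4, 10], [1, 7], [6, 6]]
def Spec_minimumEffort (tasks : List (List Int)) (out : Int) : Prop := out = minimumEffort_alt tasks
instance (tasks : List (List Int)) (out : Int) : Decidable (Spec_minimumEffort tasks out) := by unfold Spec_minimumEffort; infer_instance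

-- ===== CLAIM (what is proved, stated in full; the proofs are below) =====
def Claim_equal_minimumEffort : Prop := ∀ (tasks : List (List Int)), Dom_minimumEffort tasks → Pre_minimumEffort tasks → Spec_minimumEffort tasks (minimumEffort tasks)

-- ===== LEMMAS AND PROOFS =====

-- the list of energy requirements: for each task, its minimum plus the actual cost of
-- all tasks before it in the processed order
def pvReqs (ts : List (List Int)) : List Int :=
  match ts with
  | [] => []
  | t :: rest =>
    ((PySem.List.pyGet? t 1).getD 0) :: (pvReqs rest).map (· + (PySem.List.pyGet? t 0).getD 0)

-- the common value both programs compute: max(0, max of pvReqs)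
def pvM (ts : List (List Int)) : Int := (pvReqs ts).foldl (fun b x => max b (0 + x)) 0

-- proof-side accumulator mirroring B's former prefix view of A's loop
def pvStepB (st : Int × Int) (t : List Int) : Int × Int :=
  let actual := (PySem.List.pyGet? t 0).getD 0
  let minimum := (PySem.List.pyGet? t 1).getD 0
  (if st.2 + minimum > st.1 then st.2 + minimum else st.1, st.2 + actual)

-- A's state is (i, i - p) exactly when the prefix view's is (i, p)
theorem pv_loop_eq (l : List (List Int)) : ∀ (i p : Int),
    (l.foldl pvStepA (i, i - p)).1 = (l.foldl pvStepB (i, p)).1 := by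
  induction l with
  | nil => intro i p; rfl
  | cons t l ih =>
    intro i p
    simp only [List.foldl_cons]
    have hA : pvStepA (i, i - p) t =
        ((pvStepB (i, p) t).1, (pvStepB (i, p) t).1 - (pvStepB (i, p) t).2) := by
      simp only [pvStepA, pvStepB]
      split_ifs <;> simp <;> omega
    rw [hA, ih]

-- the prefix view computes the running max of p + requirement
theorem pv_stepB_fold (l : List (List Int)) : ∀ (acc p : Int),
    (l.foldl pvStepB (acc, p)).1 = (pvReqs l).foldl (fun b x => max b (p + x)) acc := by
  induction l with
  | nil => intro acc p; rfl
  | cons t l ih =>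
    intro acc p
    simp only [List.foldl_cons, pvReqs, List.foldl_map]
    rw [show pvStepB (acc, p) t =
        (max acc (p + (PySem.List.pyGet? t 1).getD 0), p + (PySem.List.pyGet? t 0).getD 0) from by
      simp only [pvStepB]; split_ifs <;> simp <;> omega]
    rw [ih]
    have : (fun b x => max b (p + (PySem.List.pyGet? t 0).getD 0 + x)) =
        (fun b x => max b (p + (x + (PySem.List.pyGet? t 0).getD 0))) := by
      funext b x; omega
    rw [this]

theorem pvA_eq_pvM (l : List (List Int)) : (l.foldl pvStepA (0, 0)).1 = pvM l := by
  have h := pv_loop_eq l 0 0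
  simp only [show (0:Int) - 0 = 0 from rfl] at h
  rw [h, pv_stepB_fold]; rfl

-- feasibility is exactly: at least every requirement
theorem pv_feas_iff (l : List (List Int)) : ∀ e : Int,
    pvFeasible l e = true ↔ ∀ x ∈ pvReqs l, x ≤ e := by
  induction l with
  | nil => intro e; simp [pvFeasible, pvReqs]
  | cons t l ih =>
    intro e
    simp only [pvFeasible, pvReqs, List.mem_cons, List.mem_map]
    constructor
    · intro h
      by_cases hm : e < (PySem.List.pyGet? t 1).getD 0
      · rw [if_pos hm] at h; cases h
      · rw [if_neg hm] at h
        intro x hx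
        rcases hx with hx | ⟨y, hy, rfl⟩
        · omega
        · have := (ih _).mp h y hy; omega
    · intro h
      have hm : ¬ e < (PySem.List.pyGet? t 1).getD 0 := by
        have := h _ (Or.inl rfl); omega
      rw [if_neg hm]
      exact (ih _).mpr (fun y hy => by
        have := h _ (Or.inr ⟨y, hy, rfl⟩); omega)

-- pvM bounds: nonnegative, at least every requirement, and least such
theorem pv_foldl_max_ge (l : List Int) : ∀ acc : Int,
    acc ≤ l.foldl (fun b x => max b (0 + x)) acc ∧
    ∀ x ∈ l, x ≤ l.foldl (fun b x => max b (0 + x)) acc := by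
  induction l with
  | nil => intro acc; simp
  | cons y l ih =>
    intro acc
    simp only [List.foldl_cons, List.mem_cons]
    refine ⟨le_trans (by omega) (ih _).1, ?_⟩
    intro x hx
    rcases hx with rfl | hx
    · exact le_trans (by omega) (ih _).1
    · exact (ih _).2 x hx

theorem pv_foldl_max_le (l : List Int) : ∀ acc e : Int,
    acc ≤ e → (∀ x ∈ l, x ≤ e) → l.foldl (fun b x => max b (0 + x)) acc ≤ e := by
  induction l with
  | nil => intro acc e h _; simpa using h
  | cons y l ih =>
    intro acc e h hall
    simp only [List.foldl_cons]
    exact ih _ e (by have := hall y (by simp); omega)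
      (fun x hx => hall x (by simp [hx]))

theorem pvM_nonneg (l : List (List Int)) : 0 ≤ pvM l := (pv_foldl_max_ge _ 0).1

theorem pv_reqs_le_pvM (l : List (List Int)) : ∀ x ∈ pvReqs l, x ≤ pvM l :=
  (pv_foldl_max_ge _ 0).2

-- for e ≥ 0, feasibility is exactly e ≥ pvM
theorem pv_feas_iff_pvM (l : List (List Int)) (e : Int) (he : 0 ≤ e) :
    pvFeasible l e = true ↔ pvM l ≤ e := by
  rw [pv_feas_iff]
  constructor
  · intro h; exact pv_foldl_max_le _ 0 e he h
  · intro h x hx; exact le_trans (pv_reqs_le_pvM l x hx) h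

-- pvHi bounds
theorem pv_foldl_add_shift (l : List (List Int)) : ∀ c : Int,
    l.foldl (fun s t => s + pvMx t) c = c + l.foldl (fun s t => s + pvMx t) 0 := by
  induction l with
  | nil => intro c; simp
  | cons t l ih =>
    intro c
    simp only [List.foldl_cons]
    rw [ih (c + pvMx t), ih (0 + pvMx t)]
    omega

theorem pvHi_nonneg (l : List (List Int)) : 0 ≤ pvHi l := by
  induction l with
  | nil => simp [pvHi]
  | cons t l ih =>
    simp only [pvHi, List.foldl_cons] at *
    rw [pv_foldl_add_shift]
    have : 0 ≤ pvMx t := by simp [pvMx]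
    omega

theorem pv_reqs_le_pvHi (l : List (List Int)) : ∀ x ∈ pvReqs l, x ≤ pvHi l := by
  induction l with
  | nil => simp [pvReqs]
  | cons t l ih =>
    intro x hx
    simp only [pvReqs, List.mem_cons, List.mem_map] at hx
    have hstep : pvHi (t :: l) = pvMx t + pvHi l := by
      simp only [pvHi, List.foldl_cons]; rw [pv_foldl_add_shift]; omega
    have hm : (PySem.List.pyGet? t 1).getD 0 ≤ pvMx t := by simp [pvMx]
    have ha : (PySem.List.pyGet? t 0).getD 0 ≤ pvMx t := by simp [pvMx]
    have hh := pvHi_nonneg l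
    rcases hx with rfl | ⟨y, hy, rfl⟩
    · omega
    · have := ih y hy; omega

theorem pvM_le_pvHi (l : List (List Int)) : pvM l ≤ pvHi l :=
  pv_foldl_max_le _ 0 _ (pvHi_nonneg l) (pv_reqs_le_pvHi l)

-- binary search finds pvM
theorem pvBS_eq (ts : List (List Int)) (lo hi : Int)
    (h0 : 0 ≤ lo) (h1 : lo ≤ pvM ts) (h2 : pvM ts ≤ hi) : pvBS ts lo hi = pvM ts := by
  rw [pvBS]
  by_cases hlt : lo < hi
  · rw [dif_pos hlt]
    have hmid := pvMid_bounds lo hi hlt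
    by_cases hf : pvFeasible ts (PySem.Int.floordiv (lo + hi) 2) = true
    · rw [if_pos hf]
      have : pvM ts ≤ PySem.Int.floordiv (lo + hi) 2 :=
        (pv_feas_iff_pvM ts _ (by omega)).mp hf
      exact pvBS_eq ts lo _ h0 h1 this
    · rw [if_neg hf]
      have : ¬ pvM ts ≤ PySem.Int.floordiv (lo + hi) 2 := by
        intro hle
        exact hf ((pv_feas_iff_pvM ts _ (by omega)).mpr hle)
      exact pvBS_eq ts _ hi (by omega) (by omega) h2
  · rw [dif_neg hlt]; omega
termination_by (hi - lo).toNat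
decreasing_by
  · have := pvMid_bounds lo hi hlt; omega
  · have := pvMid_bounds lo hi hlt; omega

-- ===== VERDICT (by name: the statement is the Claim_ definition above) =====
theorem minimumEffort_spec : Claim_equal_minimumEffort := by
  intro tasks _ _
  unfold Spec_minimumEffort minimumEffort minimumEffort_alt
  rw [pvA_eq_pvM, pvBS_eq _ 0 _ le_rfl (pvM_nonneg _) (pvM_le_pvHi _)]
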